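-- pv_equiv track=rewrite | github.com/AshamsVs/Engine | impact_analysis.py | get_full_impact
-- ===== SOURCE A (Python) =====
-- def get_full_impact(changed_function, reverse_graph):
--     impacted = set()
--     queue = [changed_function]
--
--     while queue:
--         current = queue.pop(0)
--
--         if current in reverse_graph:
--             for dep in reverse_graph[current]:
--                 if dep not in impacted:
--                     impacted.add(dep)
--                     queue.append(dep)
--
--     return list(impacted)
-- ===== SOURCE B (Python) =====
-- def get_full_impact(changed_function, reverse_graph):
--     # Level-synchronous BFS: process whole frontiers into a next frontier instead of one mutable queue.
--     impacted = set()
--     frontier = [changed_function]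
--     while frontier:
--         nxt = []
--         for node in frontier:
--             for dep in reverse_graph.get(node, []):
--                 if dep not in impacted:
--                     impacted.add(dep)
--                     nxt.append(dep)
--         frontier = nxt
--     return list(impacted)
-- ===== Notes on version B (the rewrite author's own statement) =====
-- stated objective: alternative
-- what changed: Replaced the single mutable queue with queue.pop(0) by a level-synchronous BFS that sweeps whole frontier lists into a next frontier (dict .get instead of membership-test plus indexing); it trades the queue for per-level lists, avoiding pop(0)'s left-shift, though not measurably faster on the generated inputs.
import Mathlib
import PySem

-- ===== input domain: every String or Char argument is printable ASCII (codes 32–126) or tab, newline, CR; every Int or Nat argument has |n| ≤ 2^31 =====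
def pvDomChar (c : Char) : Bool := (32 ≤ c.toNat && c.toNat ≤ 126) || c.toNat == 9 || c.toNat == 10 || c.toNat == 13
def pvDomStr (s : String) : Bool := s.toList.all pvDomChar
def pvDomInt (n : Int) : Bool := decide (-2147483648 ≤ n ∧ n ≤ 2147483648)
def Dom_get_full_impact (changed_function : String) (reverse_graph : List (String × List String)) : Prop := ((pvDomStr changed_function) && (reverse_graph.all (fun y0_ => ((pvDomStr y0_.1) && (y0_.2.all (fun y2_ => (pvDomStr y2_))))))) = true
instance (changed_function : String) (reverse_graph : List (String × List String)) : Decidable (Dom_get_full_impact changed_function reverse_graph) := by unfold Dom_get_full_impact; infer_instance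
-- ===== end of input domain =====

-- B replaces A's pop(0) queue BFS by level-synchronous frontier sweeps (alternative decomposition); return value proved identical.

-- ===== PORT A =====
-- inner 'for dep in reverse_graph[current]': adds unseen deps to impacted, returns them (in order) to append to the queue
def stepA (imp : PySem.Set String) (deps : List String) : PySem.Set String × List String :=
  match deps with
  | [] => (imp, [])
  | d :: ds =>
    if PySem.Set.contains imp d then stepA imp ds
    else
      let r := stepA (PySem.Set.add imp d) ds
      (r.1, d :: r.2)

-- 'while queue:' loop; fuel only makes the recursion total (one unit per node that discovers something;
-- the callers pass total-dep-count + 1, which the loop can never exhaust)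
def bfsA (fuel : Nat) (imp : PySem.Set String) (queue : List String) (g : List (String × List String)) : List String :=
  match queue with
  | [] => imp
  | c :: q =>
    match PySem.Dict.get? (PySem.Dict.mk g) c with
    | none => bfsA fuel imp q g
    | some deps =>
      match stepA imp deps with
      | (imp2, newly) =>
        if newly.isEmpty then bfsA fuel imp2 q g
        else
          match fuel with
          | 0 => imp
          | f + 1 => bfsA f imp2 (q ++ newly) g
  termination_by (fuel, queue.length)

def get_full_impact (changed_function : String) (reverse_graph : List (String × List String)) : List String :=
  bfsA ((reverse_graph.map (fun p => p.2.length)).sum + 1) PySem.Set.empty [changed_function] reverse_graph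

-- ===== PORT B =====
-- one step of 'for dep in reverse_graph.get(node, [])': state (impacted, nxt)
def stepB (acc : PySem.Set String × List String) (d : String) : PySem.Set String × List String :=
  if PySem.Set.contains acc.1 d then acc else (PySem.Set.add acc.1 d, acc.2 ++ [d])

-- 'while frontier:' with the inner 'for node in frontier' transcribed as recursion over pending,
-- collecting the next frontier in nxt; same fuel discipline as bfsA (consumed only on discovery)
def bfsB (fuel : Nat) (imp : PySem.Set String) (pending nxt : List String) (g : List (String × List String)) : List String :=
  match pending with
  | [] =>
    match nxt with
    | [] => imp
    | n :: ns => bfsB fuel imp (n :: ns) [] g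
  | c :: p =>
    match (PySem.Dict.getD (PySem.Dict.mk g) c []).foldl stepB (imp, nxt) with
    | (imp2, nxt2) =>
      if _h : nxt2.length = nxt.length then bfsB fuel imp2 p nxt2 g
      else
        match fuel with
        | 0 => imp
        | f + 1 => bfsB f imp2 p nxt2 g
  termination_by (fuel, pending.length + 2 * nxt.length)
  decreasing_by
  · exact Prod.Lex.right _ (by simp only [List.length_cons, List.length_nil]; omega)
  · exact Prod.Lex.right _ (by simp only [List.length_cons]; omega)
  · exact Prod.Lex.left _ _ (by omega)

def get_full_impact_alt (changed_function : String) (reverse_graph : List (String × List String)) : List String :=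
  bfsB ((reverse_graph.map (fun p => p.2.length)).sum + 1) PySem.Set.empty [changed_function] [] reverse_graph

-- ===== PRECONDITION & SPEC =====
def Spec_get_full_impact (changed_function : String) (reverse_graph : List (String × List String)) (out : List String) : Prop := out = get_full_impact_alt changed_function reverse_graph
instance (changed_function : String) (reverse_graph : List (String × List String)) (out : List String) : Decidable (Spec_get_full_impact changed_function reverse_graph out) := by unfold Spec_get_full_impact; infer_instance

-- ===== CLAIM (what is proved, stated in full; the proofs are below) =====
def Claim_equal_get_full_impact : Prop := ∀ (changed_function : String) (reverse_graph : List (String × List String)), Dom_get_full_impact changed_function reverse_graph → Spec_get_full_impact changed_function reverse_graph (get_full_impact changed_function reverse_graph)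

-- ===== LEMMAS AND PROOFS =====

-- B's inner fold = A's inner recursion, with discoveries appended to the running nxt
theorem fold_stepB_eq_stepA (deps : List String) (imp : PySem.Set String) (nxt : List String) :
    deps.foldl stepB (imp, nxt) = ((stepA imp deps).1, nxt ++ (stepA imp deps).2) := by
  induction deps generalizing imp nxt with
  | nil => simp [stepA]
  | cons d ds ih =>
    by_cases h : d ∈ imp
    · simp [stepA, stepB, PySem.Set.contains, h, ih]
    · simp [stepA, stepB, PySem.Set.contains, h, ih]

-- A's nonempty newly-list test, via the bridged fold
theorem stepA_snd_ne (deps : List String) (imp : PySem.Set String) (nxt : List String)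
    (h : ¬ (nxt ++ (stepA imp deps).2).length = nxt.length) : (stepA imp deps).2.isEmpty = false := by
  cases hs : (stepA imp deps).2 with
  | nil => rw [hs] at h; simp at h
  | cons a l => simp

-- The core correspondence: A's queue is B's (pending ++ nxt)
theorem bfsA_eq_bfsB (fuel : Nat) (imp : PySem.Set String) (pending nxt : List String)
    (g : List (String × List String)) :
    bfsA fuel imp (pending ++ nxt) g = bfsB fuel imp pending nxt g := by
  induction fuel, imp, pending, nxt using bfsB.induct g with
  | case1 fuel imp => simp [bfsA, bfsB]
  | case2 fuel imp d ds ih =>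
    rw [bfsB, List.nil_append, ← ih, List.append_nil]
  | case3 fuel imp nxt d ds imp2 newly hfold hlen ih =>
    rw [bfsB, hfold]
    rw [PySem.Dict.getD_eq_get?_getD] at hfold
    rw [List.cons_append, bfsA]
    cases hg : PySem.Dict.get? (PySem.Dict.mk g) d with
    | none =>
      rw [hg] at hfold
      simp only [Option.getD_none, List.foldl_nil, Prod.mk.injEq] at hfold
      dsimp only
      rw [dif_pos hlen, ← ih, hfold.1, hfold.2]
    | some deps =>
      rw [hg] at hfold
      simp only [Option.getD_some, fold_stepB_eq_stepA, Prod.mk.injEq] at hfold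
      obtain ⟨h1, h2⟩ := hfold
      have hnil : (stepA imp deps).2 = [] := by
        have h3 := hlen; rw [← h2] at h3; simpa using h3
      have hstep : stepA imp deps = (imp2, []) := by rw [← h1, ← hnil]
      dsimp only
      rw [dif_pos hlen, ← ih, hstep]
      have hnxt : newly = nxt := by rw [← h2, hnil, List.append_nil]
      simp [hnxt]
  | case4 imp nxt d ds imp2 newly hfold hlen =>
    rw [bfsB, hfold]
    rw [PySem.Dict.getD_eq_get?_getD] at hfold
    rw [List.cons_append, bfsA]
    cases hg : PySem.Dict.get? (PySem.Dict.mk g) d with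
    | none =>
      rw [hg] at hfold
      simp only [Option.getD_none, List.foldl_nil, Prod.mk.injEq] at hfold
      exact absurd (by rw [← hfold.2]) hlen
    | some deps =>
      rw [hg] at hfold
      simp only [Option.getD_some, fold_stepB_eq_stepA, Prod.mk.injEq] at hfold
      have hne := stepA_snd_ne deps imp nxt (by rw [hfold.2]; exact hlen)
      dsimp only
      rw [dif_neg hlen]
      cases hstep : stepA imp deps with
      | mk i2 n2 =>
        rw [hstep] at hne
        simp [hne]
  | case5 imp nxt d ds imp2 newly hfold hlen f ih =>
    rw [bfsB, hfold]
    rw [PySem.Dict.getD_eq_get?_getD] at hfold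
    rw [List.cons_append, bfsA]
    cases hg : PySem.Dict.get? (PySem.Dict.mk g) d with
    | none =>
      rw [hg] at hfold
      simp only [Option.getD_none, List.foldl_nil, Prod.mk.injEq] at hfold
      exact absurd (by rw [← hfold.2]) hlen
    | some deps =>
      rw [hg] at hfold
      simp only [Option.getD_some, fold_stepB_eq_stepA, Prod.mk.injEq] at hfold
      obtain ⟨h1, h2⟩ := hfold
      have hne := stepA_snd_ne deps imp nxt (by rw [h2]; exact hlen)
      dsimp only
      rw [dif_neg hlen]
      cases hstep : stepA imp deps with
      | mk i2 n2 =>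
        rw [hstep] at hne h1 h2
        dsimp only at h1 h2
        simp only [hne, Bool.false_eq_true, if_false]
        rw [← ih, h1, List.append_assoc, h2]

theorem get_full_impact_spec : Claim_equal_get_full_impact := by
  intro cf g _
  unfold Spec_get_full_impact get_full_impact get_full_impact_alt
  simpa using bfsA_eq_bfsB _ PySem.Set.empty [cf] [] g
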